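-- pv_equiv track=rewrite | github.com/alebairos/lyfe-supertask-knowledge | src/lyfe_kt/stage3_generation.py | _trim_to_mobile_limit
-- ===== SOURCE A (Python) =====
-- from typing import Dict, Any, List, Optional, Union, Tuple
--
-- def _trim_to_mobile_limit(items: List[Dict[str, Any]]) -> List[Dict[str, Any]]:
--     """Trim items to 8 max while maintaining variety."""
--     if len(items) <= 8:
--         return items
--
--     # Prioritize variety: keep content, quiz, and quote types
--     content_items = [item for item in items if item.get('type') == 'content']
--     quiz_items = [item for item in items if item.get('type') == 'quiz']
--     quote_items = [item for item in items if item.get('type') == 'quote']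
--
--     # Build final list with variety
--     final_items = []
--     final_items.extend(content_items[:3])  # Max 3 content
--     final_items.extend(quiz_items[:3])     # Max 3 quiz
--     final_items.extend(quote_items[:2])    # Max 2 quotes
--
--     return final_items[:8]  # Ensure max 8 items
-- ===== SOURCE B (Python) =====
-- from typing import Dict, Any, List
--
-- def _trim_to_mobile_limit(items: List[Dict[str, Any]]) -> List[Dict[str, Any]]:
--     """Trim items to 8 max while maintaining variety (single pass, capped buckets)."""
--     if len(items) <= 8:
--         return items
--     content, quiz, quote = [], [], []
--     for item in items:
--         t = item.get('type')
--         if t == 'content':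
--             if len(content) < 3:
--                 content.append(item)
--         elif t == 'quiz':
--             if len(quiz) < 3:
--                 quiz.append(item)
--         elif t == 'quote':
--             if len(quote) < 2:
--                 quote.append(item)
--     return content + quiz + quote
-- ===== Notes on version B (the rewrite author's own statement) =====
-- stated objective: alternative
-- what changed: Replaces three full filtering passes plus concatenation-and-double-slicing with a single pass that fills three capped buckets (max 3/3/2) and concatenates them; no [:3]/[:8] slicing is needed since the caps enforce the limits.
import Mathlib
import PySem

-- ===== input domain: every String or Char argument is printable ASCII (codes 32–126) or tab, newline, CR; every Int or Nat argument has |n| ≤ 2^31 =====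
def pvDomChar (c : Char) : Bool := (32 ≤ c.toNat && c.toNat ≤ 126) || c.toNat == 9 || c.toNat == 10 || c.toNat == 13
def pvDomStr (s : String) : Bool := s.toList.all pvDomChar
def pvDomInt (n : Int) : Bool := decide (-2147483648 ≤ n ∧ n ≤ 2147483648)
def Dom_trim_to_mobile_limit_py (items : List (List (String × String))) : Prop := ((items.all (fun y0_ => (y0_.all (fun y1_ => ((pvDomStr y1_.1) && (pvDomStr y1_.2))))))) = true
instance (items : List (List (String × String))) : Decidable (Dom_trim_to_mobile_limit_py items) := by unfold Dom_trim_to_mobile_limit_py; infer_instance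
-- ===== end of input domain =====

-- B changes the algorithm: one pass filling three capped buckets instead of three filter passes plus slicing (objective: alternative).

-- shared primitive: item.get('type') on the association-list representation of a dict (first match)
def pvGetType (it : List (String × String)) : Option String :=
  (it.find? (fun p => p.1 == "type")).map (·.2)

-- ===== PORT A =====
def trim_to_mobile_limit_py (items : List (List (String × String))) : List (List (String × String)) :=
  if items.length ≤ 8 then items
  else
    let content_items := items.filter (fun it => pvGetType it == some "content")
    let quiz_items := items.filter (fun it => pvGetType it == some "quiz")
    let quote_items := items.filter (fun it => pvGetType it == some "quote")
    -- final_items built by extend of the [:3]/[:3]/[:2] slices, then [:8]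
    let final_items := ([] : List (List (String × String)))
      ++ PySem.List.slice content_items none (some 3)
      ++ PySem.List.slice quiz_items none (some 3)
      ++ PySem.List.slice quote_items none (some 2)
    PySem.List.slice final_items none (some 8)

-- ===== PORT B =====
-- one step of B's loop: append the item to its type's bucket unless that bucket is full (caps 3/3/2)
def pvAltStep (s : List (List (String × String)) × List (List (String × String)) × List (List (String × String)))
    (it : List (String × String)) :
    List (List (String × String)) × List (List (String × String)) × List (List (String × String)) :=
  let t := pvGetType it
  if t == some "content" then
    if s.1.length < 3 then (s.1 ++ [it], s.2.1, s.2.2) else s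
  else if t == some "quiz" then
    if s.2.1.length < 3 then (s.1, s.2.1 ++ [it], s.2.2) else s
  else if t == some "quote" then
    if s.2.2.length < 2 then (s.1, s.2.1, s.2.2 ++ [it]) else s
  else s

def trim_to_mobile_limit_py_alt (items : List (List (String × String))) : List (List (String × String)) :=
  if items.length ≤ 8 then items
  else
    let s := items.foldl pvAltStep ([], [], [])
    s.1 ++ s.2.1 ++ s.2.2

-- ===== PRECONDITION & SPEC =====
def Spec_trim_to_mobile_limit_py (items : List (List (String × String))) (out : List (List (String × String))) : Prop := out = trim_to_mobile_limit_py_alt items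
instance (items : List (List (String × String))) (out : List (List (String × String))) : Decidable (Spec_trim_to_mobile_limit_py items out) := by unfold Spec_trim_to_mobile_limit_py; infer_instance

-- ===== CLAIM (what is proved, stated in full; the proofs are below) =====
def Claim_equal_trim_to_mobile_limit_py : Prop := ∀ (items : List (List (String × String))), Dom_trim_to_mobile_limit_py items → Spec_trim_to_mobile_limit_py items (trim_to_mobile_limit_py items)

-- ===== LEMMAS AND PROOFS =====

-- B's fold computes the capped prefixes of A's three filters (generalized over the running accumulator).
theorem pvAltStep_foldl (items : List (List (String × String)))
    (c q u : List (List (String × String))) :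
    items.foldl pvAltStep (c, q, u) =
      (c ++ (items.filter (fun it => pvGetType it == some "content")).take (3 - c.length),
       q ++ (items.filter (fun it => pvGetType it == some "quiz")).take (3 - q.length),
       u ++ (items.filter (fun it => pvGetType it == some "quote")).take (2 - u.length)) := by
  induction items generalizing c q u with
  | nil => simp
  | cons it rest ih =>
    simp only [List.foldl_cons, List.filter_cons]
    by_cases hc : (pvGetType it == some "content") = true
    · have hq : (pvGetType it == some "quiz") = false := by
        simp only [beq_iff_eq] at hc ⊢; simp [hc]
      have hu : (pvGetType it == some "quote") = false := by
        simp only [beq_iff_eq] at hc ⊢; simp [hc]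
      rw [show pvAltStep (c, q, u) it = if c.length < 3 then (c ++ [it], q, u) else (c, q, u) by
        simp [pvAltStep, hc]]
      by_cases hlen : c.length < 3
      · simp only [if_pos hlen, ih, hc, hq, hu, if_true]
        simp only [List.take_cons (by omega : 0 < 3 - c.length)]
        simp [List.append_assoc]
        omega
      · simp only [if_neg hlen, ih, hc, hq, hu, if_true]
        have : 3 - c.length = 0 := by omega
        simp [this]
    · by_cases hq : (pvGetType it == some "quiz") = true
      · have hu : (pvGetType it == some "quote") = false := by
          simp only [beq_iff_eq] at hq ⊢; simp [hq]
        rw [show pvAltStep (c, q, u) it = if q.length < 3 then (c, q ++ [it], u) else (c, q, u) by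
          simp [pvAltStep, hc, hq]]
        by_cases hlen : q.length < 3
        · simp only [if_pos hlen, ih, hc, hq, hu, if_true]
          simp only [List.take_cons (by omega : 0 < 3 - q.length)]
          simp [List.append_assoc]
          omega
        · simp only [if_neg hlen, ih, hc, hq, hu, if_true]
          have : 3 - q.length = 0 := by omega
          simp [this]
      · by_cases hu : (pvGetType it == some "quote") = true
        · rw [show pvAltStep (c, q, u) it = if u.length < 2 then (c, q, u ++ [it]) else (c, q, u) by
            simp [pvAltStep, hc, hq, hu]]
          by_cases hlen : u.length < 2
          · simp only [if_pos hlen, ih, hc, hq, hu, if_true]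
            simp only [List.take_cons (by omega : 0 < 2 - u.length)]
            simp [List.append_assoc]
            omega
          · simp only [if_neg hlen, ih, hc, hq, hu, if_true]
            have : 2 - u.length = 0 := by omega
            simp [this]
        · rw [show pvAltStep (c, q, u) it = (c, q, u) by simp [pvAltStep, hc, hq, hu]]
          simp [ih, hc, hq, hu]

-- ===== VERDICT (by name: the statement is the Claim_ definition above) =====
theorem trim_to_mobile_limit_py_spec : Claim_equal_trim_to_mobile_limit_py := by
  intro items _
  unfold Spec_trim_to_mobile_limit_py trim_to_mobile_limit_py trim_to_mobile_limit_py_alt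
  by_cases h : items.length ≤ 8
  · simp [h]
  · simp only [if_neg h]
    rw [pvAltStep_foldl]
    simp only [List.nil_append, List.length_nil, Nat.sub_zero]
    rw [show ((3:Int)) = ((3:Nat) : Int) from rfl, show ((2:Int)) = ((2:Nat) : Int) from rfl,
        show ((8:Int)) = ((8:Nat) : Int) from rfl]
    simp only [PySem.List.slice_to_natCast]
    apply List.take_of_length_le
    simp only [List.length_append, List.length_take]
    omega
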